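-- pv_equiv track=rewrite | github.com/Dfordatascience/leetCode | 238. Product of Array Except Self.py | product_arrays
-- ===== SOURCE A (Python) =====
-- def product_arrays(nums):
--     n = len(nums)
--     result = [0]* n
--     for i in range(n):
--         count = 1
--         for j in range(i+1,n):
--             count *= nums[j]
--         result[i] = count
--     return result
-- ===== SOURCE B (Python) =====
-- def product_arrays(nums):
--     out = []
--     acc = 1
--     for x in reversed(nums):
--         out.append(acc)
--         acc *= x
--     out.reverse()
--     return out
-- ===== Notes on version B (the rewrite author's own statement) =====
-- stated objective: faster
-- what changed: Replaced the nested loops (recomputing each suffix product from scratch) by a single backward pass that maintains a running suffix product and builds the result in reverse.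
import Mathlib
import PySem

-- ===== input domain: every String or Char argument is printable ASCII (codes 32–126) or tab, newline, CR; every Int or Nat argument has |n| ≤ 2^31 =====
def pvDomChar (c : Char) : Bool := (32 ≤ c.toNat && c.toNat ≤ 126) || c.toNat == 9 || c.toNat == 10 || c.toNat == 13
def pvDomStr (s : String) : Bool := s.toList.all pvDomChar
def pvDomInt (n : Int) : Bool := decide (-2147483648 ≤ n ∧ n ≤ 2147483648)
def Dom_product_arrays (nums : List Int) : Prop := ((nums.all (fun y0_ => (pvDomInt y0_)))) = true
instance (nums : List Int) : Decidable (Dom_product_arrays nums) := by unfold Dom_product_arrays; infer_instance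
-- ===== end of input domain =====

-- ===== PORT A =====
-- B replaces A's O(n^2) nested loops by one backward pass with a running suffix product.
def product_arrays (nums : List Int) : List Int :=
  let n : Int := nums.length
  (PySem.List.pyRange 0 n 1).foldl
    (fun result i =>
      let count := (PySem.List.pyRange (i + 1) n 1).foldl
        (fun c j => c * PySem.List.pyGetD nums j 0) 1
      PySem.List.pySetD result i count)
    (List.replicate nums.length 0)

-- ===== PORT B =====
def product_arrays_alt (nums : List Int) : List Int :=
  let s := nums.reverse.foldl
    (fun (s : Int × List Int) x => (s.1 * x, s.2 ++ [s.1])) (1, [])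
  s.2.reverse

-- ===== PRECONDITION & SPEC =====
def Spec_product_arrays (nums : List Int) (out : List Int) : Prop := out = product_arrays_alt nums
instance (nums : List Int) (out : List Int) : Decidable (Spec_product_arrays nums out) := by unfold Spec_product_arrays; infer_instance

-- ===== CLAIM (what is proved, stated in full; the proofs are below) =====
def Claim_equal_product_arrays : Prop := ∀ (nums : List Int), Dom_product_arrays nums → Spec_product_arrays nums (product_arrays nums)

-- ===== LEMMAS AND PROOFS =====

-- suffix products: sp nums = [prod nums[1:], prod nums[2:], ..., 1]
def sp : List Int → List Int
  | [] => []
  | _ :: xs => xs.prod :: sp xs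

-- A's outer loop: setting index i of a length-(m+n) list to g i for every i in range(m, m+n)
lemma foldl_set_range (g : Int → Int) :
    ∀ (n m : Nat) (r : List Int), r.length = m + n →
      (PySem.List.pyRange (m : Int) ((m + n : Nat) : Int) 1).foldl
        (fun r i => PySem.List.pySetD r i (g i)) r
      = r.take m ++ (List.range n).map (fun k => g ((m + k : Nat) : Int)) := by
  intro n
  induction n with
  | zero =>
    intro m r hr
    rw [PySem.List.pyRange_one_eq_nil (by push_cast; omega)]
    simp only [List.foldl_nil, List.range_zero, List.map_nil, List.append_nil]
    exact (List.take_of_length_le (by omega)).symm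
  | succ n ih =>
    intro m r hr
    rw [PySem.List.pyRange_one_cons (by push_cast; omega)]
    simp only [List.foldl_cons]
    rw [PySem.List.pySetD_natCast r m (g m)]
    have h1 : ((m : Int) + 1) = ((m + 1 : Nat) : Int) := by push_cast; ring
    have h2 : ((m + (n + 1) : Nat) : Int) = ((m + 1 + n : Nat) : Int) := by push_cast; ring
    rw [h1, h2, ih (m + 1) (r.set m (g m)) (by simp; omega)]
    have htake : (r.set m (g m)).take (m + 1) = r.take m ++ [g m] := by
      rw [List.take_add_one, List.take_set_of_le (le_refl m), List.getElem?_set_self]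
      · simp
      · omega
    have hmap : (fun k => g ((m + 1 + k : Nat) : Int)) = (fun k => g ((m + (k + 1) : Nat) : Int)) := by
      funext k; congr 1; push_cast; ring
    rw [htake, hmap, List.range_succ_eq_map]
    simp [Function.comp_def]

-- A's inner loop computes the suffix product
lemma inner_count (nums : List Int) (k : Nat) :
    (PySem.List.pyRange ((k : Int) + 1) ((nums.length : Nat) : Int) 1).foldl
      (fun c j => c * PySem.List.pyGetD nums j 0) 1
    = (nums.drop (k + 1)).prod := by
  have h1 : ((k : Int) + 1) = ((k + 1 : Nat) : Int) := by push_cast; ring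
  rw [h1, PySem.List.foldl_pyRange_pyGetD' nums 0 (fun c v => c * v) 1
    (a := ((k + 1 : Nat) : Int)) (by positivity)]
  simp [List.prod_eq_foldl]

-- the list of suffix products, index by index, is sp
lemma map_range_sp (nums : List Int) :
    (List.range nums.length).map (fun k => (nums.drop (k + 1)).prod) = sp nums := by
  induction nums with
  | nil => simp [sp]
  | cons x xs ih =>
    simp only [List.length_cons, sp]
    rw [List.range_succ_eq_map]
    simp only [List.map_cons, List.map_map, List.drop_succ_cons, List.drop_zero,
      Function.comp_def, Nat.succ_eq_add_one]
    rw [ih]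

-- B's fold computes (running product, suffix products in reverse order)
lemma alt_fold (nums : List Int) :
    nums.foldr (fun x (s : Int × List Int) => (s.1 * x, s.2 ++ [s.1])) (1, []) =
      (nums.prod, (sp nums).reverse) := by
  induction nums with
  | nil => simp [sp]
  | cons x xs ih =>
    simp only [List.foldr_cons, ih, sp, List.prod_cons, List.reverse_cons]
    exact Prod.ext (by ring) rfl

lemma alt_eq_sp (nums : List Int) : product_arrays_alt nums = sp nums := by
  show ((nums.reverse.foldl
    (fun (s : Int × List Int) x => (s.1 * x, s.2 ++ [s.1])) (1, [])).2).reverse = sp nums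
  rw [List.foldl_reverse]
  show (nums.foldr (fun x (s : Int × List Int) => (s.1 * x, s.2 ++ [s.1])) (1, [])).2.reverse = sp nums
  rw [alt_fold]
  simp

lemma a_eq_sp (nums : List Int) : product_arrays nums = sp nums := by
  unfold product_arrays
  have h := foldl_set_range
    (fun i => (PySem.List.pyRange (i + 1) ((nums.length : Nat) : Int) 1).foldl
        (fun c j => c * PySem.List.pyGetD nums j 0) 1)
    nums.length 0 (List.replicate nums.length 0) (by simp)
  simp only [Nat.zero_add, Nat.cast_zero] at h
  rw [h]
  simp only [List.take_zero, List.nil_append]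
  rw [← map_range_sp nums]
  congr 1
  funext k
  exact inner_count nums k

-- ===== VERDICT (by name: the statement is the Claim_ definition above) =====
theorem product_arrays_spec : Claim_equal_product_arrays := by
  intro nums _
  unfold Spec_product_arrays
  rw [a_eq_sp, alt_eq_sp]
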